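-- pv_equiv track=rewrite | github.com/mizz0224/AlgorithmStudy | 프로그래머스/lv2/17683. ［3차］ 방금그곡/［3차］ 방금그곡.py | devide
-- ===== SOURCE A (Python) =====
-- def devide(pitches) :
--     devided = []
--     pitch = ""
--     for ch in pitches:
--         if 64 < ord(ch) and ord(ch) < 90:
--             if pitch != "":
--                 devided.append(pitch)
--             pitch = ch
--         else :
--             pitch += ch
--     devided.append(pitch)
--     return devided
-- ===== SOURCE B (Python) =====
-- def devide(pitches):
--     # Right-to-left pass: a note-start letter (A-Y) closes the group it begins,
--     # so groups are emitted back-to-front and reversed once at the end.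
--     groups = []
--     buf = []  # characters of the current group, collected right-to-left
--     for ch in reversed(pitches):
--         buf.append(ch)
--         if 65 <= ord(ch) <= 89:
--             groups.append(''.join(reversed(buf)))
--             buf.clear()
--     groups.reverse()
--     if buf or not groups:
--         groups.insert(0, ''.join(reversed(buf)))
--     return groups
-- ===== Notes on version B (the rewrite author's own statement) =====
-- stated objective: alternative
-- what changed: B traverses the string right-to-left: each note-start letter (A-Y) closes the group it begins, so groups are emitted back-to-front into a buffer of reversed characters and flipped once at the end, instead of A's left-to-right accumulate-and-flush string building.
import Mathlib
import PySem

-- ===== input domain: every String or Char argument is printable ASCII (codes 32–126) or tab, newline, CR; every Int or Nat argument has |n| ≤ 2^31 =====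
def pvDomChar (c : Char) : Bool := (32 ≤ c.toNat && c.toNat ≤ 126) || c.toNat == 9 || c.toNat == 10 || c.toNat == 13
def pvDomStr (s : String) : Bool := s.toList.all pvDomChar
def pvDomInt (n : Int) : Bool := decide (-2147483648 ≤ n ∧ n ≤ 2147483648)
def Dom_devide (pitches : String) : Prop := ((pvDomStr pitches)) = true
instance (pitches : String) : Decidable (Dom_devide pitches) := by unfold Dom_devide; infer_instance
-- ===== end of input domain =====

-- B traverses the string right-to-left, emitting groups back-to-front; same result as A's
-- left-to-right accumulate-and-flush pass. Equivalence of the return values is proved below.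

-- ===== PORT A =====
-- A's loop: state (devided, pitch); on a note-start letter flush the non-empty pitch,
-- otherwise extend it. Strings are carried as List Char, turned into String at the end.
def devideStepA (st : List (List Char) × List Char) (ch : Char) :
    List (List Char) × List Char :=
  if 64 < ch.toNat ∧ ch.toNat < 90 then
    (if st.2 ≠ [] then st.1 ++ [st.2] else st.1, [ch])
  else
    (st.1, st.2 ++ [ch])

def devide (pitches : String) : List String :=
  let st := pitches.toList.foldl devideStepA ([], [])
  (st.1 ++ [st.2]).map String.mk

-- ===== PORT B =====
-- B's loop: over the reversed string, `buf` collects the current group's characters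
-- right-to-left; a note-start letter closes the group (append buf reversed, clear buf).
def devideStepB (st : List (List Char) × List Char) (ch : Char) :
    List (List Char) × List Char :=
  let buf := st.2 ++ [ch]
  if 65 ≤ ch.toNat ∧ ch.toNat ≤ 89 then (st.1 ++ [buf.reverse], []) else (st.1, buf)

def devide_alt (pitches : String) : List String :=
  let st := pitches.toList.reverse.foldl devideStepB ([], [])
  let groups := st.1.reverse
  let groups := if st.2 ≠ [] ∨ groups = [] then st.2.reverse :: groups else groups
  groups.map String.mk

-- ===== PRECONDITION & SPEC =====
def Spec_devide (pitches : String) (out : List String) : Prop := out = devide_alt pitches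
instance (pitches : String) (out : List String) : Decidable (Spec_devide pitches out) := by unfold Spec_devide; infer_instance

-- ===== CLAIM (what is proved, stated in full; the proofs are below) =====
def Claim_equal_devide : Prop := ∀ (pitches : String), Dom_devide pitches → Spec_devide pitches (devide pitches)

-- ===== LEMMAS AND PROOFS =====

-- forward spec of A's loop with a non-empty current group
def pvNe (cur : List Char) : List Char → List (List Char)
  | [] => [cur]
  | c :: cs => if (65 ≤ c.toNat ∧ c.toNat ≤ 89) then cur :: pvNe [c] cs else pvNe (cur ++ [c]) cs

-- right-to-left spec: (open leading group, closed groups)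
def pvFR : List Char → List Char × List (List Char)
  | [] => ([], [])
  | c :: cs =>
    let p := pvFR cs
    if (65 ≤ c.toNat ∧ c.toNat ≤ 89) then ([], (c :: p.1) :: p.2) else (c :: p.1, p.2)

theorem pvStartIff (c : Char) : (64 < c.toNat ∧ c.toNat < 90) ↔ (65 ≤ c.toNat ∧ c.toNat ≤ 89) := by
  omega

-- A's fold with a non-empty current group computes pvNe
theorem pvFoldA (cs : List Char) : ∀ (acc : List (List Char)) (cur : List Char),
    cur ≠ [] →
    (cs.foldl devideStepA (acc, cur)).1 ++ [(cs.foldl devideStepA (acc, cur)).2]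
      = acc ++ pvNe cur cs := by
  induction cs with
  | nil => intro acc cur _; simp [pvNe]
  | cons c cs ih =>
    intro acc cur h
    by_cases hs : (65 ≤ c.toNat ∧ c.toNat ≤ 89)
    · have : devideStepA (acc, cur) c = (acc ++ [cur], [c]) := by
        simp [devideStepA, (pvStartIff c).2 hs, h]
      simp only [List.foldl_cons, this, pvNe, if_pos hs,
        ih (acc ++ [cur]) [c] (by simp), List.append_assoc, List.singleton_append]
    · have hns : ¬ (64 < c.toNat ∧ c.toNat < 90) := fun hh => hs ((pvStartIff c).1 hh)
      have : devideStepA (acc, cur) c = (acc, cur ++ [c]) := by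
        unfold devideStepA; rw [if_neg hns]
      simp only [List.foldl_cons, this, pvNe, if_neg hs,
        ih acc (cur ++ [c]) (by simp)]

-- pvNe in terms of the right-to-left spec
theorem pvNe_fr (cs : List Char) : ∀ (cur : List Char),
    pvNe cur cs = (cur ++ (pvFR cs).1) :: (pvFR cs).2 := by
  induction cs with
  | nil => intro cur; simp [pvNe, pvFR]
  | cons c cs ih =>
    intro cur
    by_cases hs : (65 ≤ c.toNat ∧ c.toNat ≤ 89)
    · simp [pvNe, pvFR, if_pos hs, ih [c]]
    · simp [pvNe, pvFR, if_neg hs, ih (cur ++ [c]), List.append_assoc]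

-- B's fold over the reversed list carries pvFR (groups and buffer reversed)
theorem pvFoldB (cs : List Char) :
    cs.reverse.foldl devideStepB ([], [])
      = ((pvFR cs).2.reverse, (pvFR cs).1.reverse) := by
  rw [List.foldl_reverse]
  induction cs with
  | nil => simp [pvFR]
  | cons c cs ih =>
    simp only [List.foldr_cons, ih]
    by_cases hs : (65 ≤ c.toNat ∧ c.toNat ≤ 89)
    · simp [pvFR, devideStepB, hs]
    · simp [pvFR, devideStepB, hs]

-- both ports as group lists over pvFR
theorem pvB_char (pitches : String) :
    devide_alt pitches
      = (let p := pvFR pitches.toList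
         if p.1 ≠ [] ∨ p.2 = [] then (p.1 :: p.2).map String.mk
         else p.2.map String.mk) := by
  unfold devide_alt
  simp only [pvFoldB, List.reverse_reverse]
  by_cases h : (pvFR pitches.toList).1 ≠ [] ∨ (pvFR pitches.toList).2 = [] <;>
    simp_all

theorem pvA_char (pitches : String) :
    devide pitches
      = (let p := pvFR pitches.toList
         if p.1 ≠ [] ∨ p.2 = [] then (p.1 :: p.2).map String.mk
         else p.2.map String.mk) := by
  unfold devide
  cases hcs : pitches.toList with
  | nil => simp [pvFR]
  | cons c cs =>
    have hstep : devideStepA ([], []) c = ([], [c]) := by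
      by_cases hs : 64 < c.toNat ∧ c.toNat < 90 <;> simp [devideStepA, hs]
    simp only [List.foldl_cons, hstep]
    have := pvFoldA cs [] [c] (by simp)
    simp only [List.nil_append] at this
    rw [this, pvNe_fr]
    by_cases hs : (65 ≤ c.toNat ∧ c.toNat ≤ 89)
    · simp [pvFR, if_pos hs]
    · have hne : (c :: (pvFR cs).1) ≠ [] := by simp
      simp [pvFR, if_neg hs, hne]

-- ===== VERDICT (by name: the statement is the Claim_ definition above) =====
theorem devide_spec : Claim_equal_devide := by
  intro pitches _
  unfold Spec_devide
  rw [pvA_char, pvB_char]
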